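-- pv_equiv track=rewrite | github.com/qtc-de/vve | python/vve/encode.py | encode_binary
-- ===== SOURCE A (Python) =====
-- def encode_binary(data):
--     '''
--     Applies binary encoding to the input data. Input can be supplied
--     as string or bytes. If it is string, each character is
--     interpreted as an utf-8 encoded byte sequence and is translated
--     into a eight digit binary sequence.
--
--     Parameters:
--         data                (string/bytes)      Input data
--
--     Returns:
--         return_value        (string)            Binary formatted output
--     '''
--     if not isinstance(data, bytes):
--         data = data.encode('utf-8')
--
--     return_value = ''
--     for byte in data:
--         binary = "{:08b}".format(byte)
--         return_value += binary
--
--     return return_value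
-- ===== SOURCE B (Python) =====
-- def encode_binary(data):
--     if not isinstance(data, bytes):
--         data = data.encode('utf-8')
--     out = []
--     for byte in data:
--         for k in range(8):
--             out.append('1' if (byte >> (7 - k)) & 1 else '0')
--     return ''.join(out)
-- ===== Notes on version B (the rewrite author's own statement) =====
-- stated objective: alternative
-- what changed: Replaces the per-byte '{:08b}'.format-and-concatenate loop with direct bit extraction: for each byte it tests the 8 bits by shift-and-mask and collects the '0'/'1' characters in a list joined once at the end.
import Mathlib
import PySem

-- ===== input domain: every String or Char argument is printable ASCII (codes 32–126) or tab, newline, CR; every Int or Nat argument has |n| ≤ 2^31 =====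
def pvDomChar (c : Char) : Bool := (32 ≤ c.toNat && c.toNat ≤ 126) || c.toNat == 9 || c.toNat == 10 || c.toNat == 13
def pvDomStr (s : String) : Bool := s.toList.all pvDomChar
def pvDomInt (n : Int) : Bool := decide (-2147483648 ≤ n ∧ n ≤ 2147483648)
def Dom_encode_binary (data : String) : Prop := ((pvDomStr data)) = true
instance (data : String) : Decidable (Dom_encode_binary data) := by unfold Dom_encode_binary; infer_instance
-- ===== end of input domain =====

-- B replaces A's per-byte '{:08b}'.format loop by direct shift-and-mask bit extraction
-- per byte (alternative decomposition, same cost).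


-- ===== PORT A =====
-- binary digits of n, most significant first (empty for 0): the core of Python's 'b' format
-- (structural recursion on a fuel bound ≥ n, so the definition reduces by computation)
def natToBinAux : Nat → Nat → List Char
  | 0, _ => []
  | fuel+1, n =>
    if n = 0 then []
    else natToBinAux fuel (n / 2) ++ [if n % 2 = 1 then '1' else '0']

def natToBin (n : Nat) : List Char := natToBinAux n n

-- Python's "{:08b}".format(byte): binary digits zero-padded on the left to width 8
def pyBinFormat (w : Nat) (n : Nat) : List Char :=
  let s := if n = 0 then ['0'] else natToBin n
  List.replicate (w - s.length) '0' ++ s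

def encode_binary (data : String) : String :=
  -- 'data.encode("utf-8")' : on the ASCII domain each char is one byte = its code point
  String.mk (data.toList.foldl (fun acc c => acc ++ pyBinFormat 8 c.toNat) [])

-- ===== PORT B =====
-- B extracts the 8 bits of each byte by shift-and-mask, most significant first,
-- into one list of '0'/'1' characters joined at the end.
def encode_binary_alt (data : String) : String :=
  String.mk (data.toList.flatMap (fun c =>
    (List.range 8).map (fun k => if (c.toNat >>> (7 - k)) &&& 1 ≠ 0 then '1' else '0')))

-- ===== PRECONDITION & SPEC =====
def Spec_encode_binary (data : String) (out : String) : Prop := out = encode_binary_alt data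
instance (data : String) (out : String) : Decidable (Spec_encode_binary data out) := by unfold Spec_encode_binary; infer_instance

-- ===== CLAIM (what is proved, stated in full; the proofs are below) =====
def Claim_equal_encode_binary : Prop := ∀ (data : String), Dom_encode_binary data → Spec_encode_binary data (encode_binary data)

-- ===== LEMMAS AND PROOFS =====

-- per-byte agreement of the two renderings, checked by computation over all 256 bytes
set_option maxRecDepth 10000 in
set_option maxHeartbeats 1000000 in
theorem byte_eq : ∀ n, n < 256 → pyBinFormat 8 n =
    (List.range 8).map (fun k => if (n >>> (7 - k)) &&& 1 ≠ 0 then '1' else '0') := by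
  decide

-- ===== VERDICT (by name: the statement is the Claim_ definition above) =====
theorem encode_binary_spec : Claim_equal_encode_binary := by
  intro data hdom
  unfold Spec_encode_binary encode_binary encode_binary_alt
  rw [PySem.List.foldl_append_eq_flatMap]
  simp only [List.nil_append]
  congr 1
  apply List.flatMap_congr
  intro c hc
  have := List.all_eq_true.mp hdom c hc
  simp [pvDomChar] at this
  exact byte_eq c.toNat (by omega)
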